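-- pv_equiv track=rewrite | github.com/MemberA2600/Fortari2600 | src/Compile/Compiler.py | getClosestPowerOf2Minus1
-- ===== SOURCE A (Python) =====
-- def getClosestPowerOf2Minus1(v):
--     from math import pow
--
--     c = bin(v)[2:]
--     goodOnes = []
--
--     for num in range(1, 9):
--         b = bin(int(pow(2, num))-1)[2:]
--         while len(b) < 8: b = "0" + b
--         goodOnes.append(b)
--
--     while True:
--         c = bin(v)[2:]
--         while len(c) < 8: c = "0" + c
--         if c in goodOnes: break
--         v = v-1
--
--     return(int("0b"+c, 2))
-- ===== SOURCE B (Python) =====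
-- def getClosestPowerOf2Minus1(v):
--     # Halve an all-ones mask until it fits: O(1) instead of decrementing v.
--     m = 255
--     while m > v:
--         m >>= 1
--     return m
-- ===== Notes on version B (the rewrite author's own statement) =====
-- stated objective: faster
-- what changed: Instead of decrementing v one by one until its 8-bit binary string matches a precomputed table, B halves a 255 mask until it is <= v, returning the largest 2^n-1 <= v in at most 8 steps.
import Mathlib
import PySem

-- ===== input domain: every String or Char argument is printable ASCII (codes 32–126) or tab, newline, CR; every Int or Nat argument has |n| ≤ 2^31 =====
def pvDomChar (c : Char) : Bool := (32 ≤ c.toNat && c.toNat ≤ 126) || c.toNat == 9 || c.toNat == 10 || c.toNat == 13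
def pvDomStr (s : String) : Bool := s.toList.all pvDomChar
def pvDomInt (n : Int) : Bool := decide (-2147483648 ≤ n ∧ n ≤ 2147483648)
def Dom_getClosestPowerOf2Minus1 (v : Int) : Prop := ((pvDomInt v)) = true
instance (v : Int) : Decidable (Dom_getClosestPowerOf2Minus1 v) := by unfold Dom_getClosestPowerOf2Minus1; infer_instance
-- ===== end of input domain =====

-- B replaces A's one-by-one decrement of v (O(v)) by halving a 255 mask (O(1));
-- equivalence of the RETURN value is proved for v ≥ 1 (A loops forever for v ≤ 0).

-- ===== PORT A =====

-- bin(n)[2:] for a nonnegative n, as a list of '0'/'1' chars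
def pvBinCore (n : Nat) : List Char :=
  if n < 2 then [if n = 1 then '1' else '0']
  else pvBinCore (n / 2) ++ [if n % 2 = 1 then '1' else '0']

-- while len(b) < 8: b = "0" + b
def pvPad8 (c : List Char) : List Char :=
  if c.length < 8 then pvPad8 ('0' :: c) else c
termination_by 8 - c.length

-- int("0b"+c, 2) on a list of '0'/'1' chars
def pvParseBin (c : List Char) : Int :=
  c.foldl (fun a ch => 2 * a + (if ch = '1' then 1 else 0)) 0

-- goodOnes built by the range(1,9) loop
def pvGoodOnes : List (List Char) :=
  (PySem.List.pyRange 1 9 1).foldl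
    (fun acc num => acc ++ [pvPad8 (pvBinCore ((2 : Nat) ^ num.toNat - 1))]) []

-- 'while True' decrement loop; the v ≤ 0 guard only makes the recursion total
-- (Python loops forever there; Pre_ excludes it)
def pvLoopA (v : Int) : Int :=
  if _h : v ≤ 0 then 0
  else
    let c := pvPad8 (pvBinCore v.toNat)
    if c ∈ pvGoodOnes then pvParseBin c else pvLoopA (v - 1)
termination_by v.toNat
decreasing_by omega

def getClosestPowerOf2Minus1 (v : Int) : Int := pvLoopA v

-- ===== PORT B =====

-- the m ≤ 0 guard only makes the recursion total (unreachable for v ≥ 1);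
-- in the reachable case m > 0, Python's m >> 1 is floor division by 2
def pvAltLoop (v m : Int) : Int :=
  if _h : m ≤ 0 then m
  else if m > v then pvAltLoop v (PySem.Int.floordiv m 2) else m
termination_by m.toNat
decreasing_by
  have : PySem.Int.floordiv m 2 = m / 2 := PySem.Int.floordiv_eq_ediv_of_pos (by omega)
  omega

def getClosestPowerOf2Minus1_alt (v : Int) : Int := pvAltLoop v 255

-- ===== PRECONDITION & SPEC =====
-- A's decrement loop never terminates for v ≤ 0 (bin(v) of a negative never matches), so:
def Pre_getClosestPowerOf2Minus1 (v : Int) : Prop := 1 ≤ v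
instance (v : Int) : Decidable (Pre_getClosestPowerOf2Minus1 v) := by unfold Pre_getClosestPowerOf2Minus1; infer_instance
def pvWitness_getClosestPowerOf2Minus1 : Int := 5

def Spec_getClosestPowerOf2Minus1 (v : Int) (out : Int) : Prop := out = getClosestPowerOf2Minus1_alt v
instance (v : Int) (out : Int) : Decidable (Spec_getClosestPowerOf2Minus1 v out) := by unfold Spec_getClosestPowerOf2Minus1; infer_instance

-- ===== CLAIM (what is proved, stated in full; the proofs are below) =====
def Claim_equal_getClosestPowerOf2Minus1 : Prop := ∀ (v : Int), Dom_getClosestPowerOf2Minus1 v → Pre_getClosestPowerOf2Minus1 v → Spec_getClosestPowerOf2Minus1 v (getClosestPowerOf2Minus1 v)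

-- ===== LEMMAS AND PROOFS =====

set_option maxRecDepth 10000
set_option maxHeartbeats 1000000

-- the common target: the largest number of the form 2^n-1 (1 ≤ n ≤ 8) that is ≤ v
def pvTarget (v : Int) : Int :=
  if 255 ≤ v then 255 else if 127 ≤ v then 127 else if 63 ≤ v then 63
  else if 31 ≤ v then 31 else if 15 ≤ v then 15 else if 7 ≤ v then 7
  else if 3 ≤ v then 3 else 1

theorem pvRange19 : PySem.List.pyRange 1 9 1 = [1, 2, 3, 4, 5, 6, 7, 8] := by
  have h8 : Int.toNat 8 = 8 := rfl
  norm_num [PySem.List.pyRange, h8, List.range_succ]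

theorem pvGoodOnes_eval : pvGoodOnes =
    [ ['0', '0', '0', '0', '0', '0', '0', '1'],
      ['0', '0', '0', '0', '0', '0', '1', '1'],
      ['0', '0', '0', '0', '0', '1', '1', '1'],
      ['0', '0', '0', '0', '1', '1', '1', '1'],
      ['0', '0', '0', '1', '1', '1', '1', '1'],
      ['0', '0', '1', '1', '1', '1', '1', '1'],
      ['0', '1', '1', '1', '1', '1', '1', '1'],
      ['1', '1', '1', '1', '1', '1', '1', '1'] ] := by
  rw [pvGoodOnes, pvRange19]
  have e1 : pvPad8 (pvBinCore ((2:Nat) ^ (Int.toNat 1) - 1)) = ['0', '0', '0', '0', '0', '0', '0', '1'] := by simp [pvBinCore, pvPad8]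
  have e2 : pvPad8 (pvBinCore ((2:Nat) ^ (Int.toNat 2) - 1)) = ['0', '0', '0', '0', '0', '0', '1', '1'] := by simp [pvBinCore, pvPad8]
  have e3 : pvPad8 (pvBinCore ((2:Nat) ^ (Int.toNat 3) - 1)) = ['0', '0', '0', '0', '0', '1', '1', '1'] := by simp [pvBinCore, pvPad8]
  have e4 : pvPad8 (pvBinCore ((2:Nat) ^ (Int.toNat 4) - 1)) = ['0', '0', '0', '0', '1', '1', '1', '1'] := by simp [pvBinCore, pvPad8]
  have e5 : pvPad8 (pvBinCore ((2:Nat) ^ (Int.toNat 5) - 1)) = ['0', '0', '0', '1', '1', '1', '1', '1'] := by simp [pvBinCore, pvPad8]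
  have e6 : pvPad8 (pvBinCore ((2:Nat) ^ (Int.toNat 6) - 1)) = ['0', '0', '1', '1', '1', '1', '1', '1'] := by simp [pvBinCore, pvPad8]
  have e7 : pvPad8 (pvBinCore ((2:Nat) ^ (Int.toNat 7) - 1)) = ['0', '1', '1', '1', '1', '1', '1', '1'] := by simp [pvBinCore, pvPad8]
  have e8 : pvPad8 (pvBinCore ((2:Nat) ^ (Int.toNat 8) - 1)) = ['1', '1', '1', '1', '1', '1', '1', '1'] := by simp [pvBinCore, pvPad8]
  simp only [List.foldl, e1, e2, e3, e4, e5, e6, e7, e8]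
  rfl

theorem pvParseBin_pad8 (c : List Char) : pvParseBin (pvPad8 c) = pvParseBin c := by
  fun_induction pvPad8 c with
  | case1 c h ih => simpa [pvParseBin] using ih
  | case2 c h => rfl

theorem pvParseBin_binCore (n : Nat) : pvParseBin (pvBinCore n) = (n : Int) := by
  fun_induction pvBinCore n with
  | case1 n h =>
      interval_cases n <;> rfl
  | case2 n h ih =>
      simp only [pvParseBin, List.foldl_append] at *
      rw [ih]
      rcases Nat.mod_two_eq_zero_or_one n with h1 | h1 <;> simp [h1, List.foldl] <;> omega

theorem pvMem_goodOnes (n : Nat) (hn : 1 ≤ n) :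
    pvPad8 (pvBinCore n) ∈ pvGoodOnes ↔
      n = 1 ∨ n = 3 ∨ n = 7 ∨ n = 15 ∨ n = 31 ∨ n = 63 ∨ n = 127 ∨ n = 255 := by
  constructor
  · intro hmem
    rw [pvGoodOnes_eval] at hmem
    have hparse : pvParseBin (pvPad8 (pvBinCore n)) = (n : Int) := by
      rw [pvParseBin_pad8, pvParseBin_binCore]
    simp only [List.mem_cons, List.not_mem_nil, or_false] at hmem
    rcases hmem with h | h | h | h | h | h | h | h <;>
      (rw [h] at hparse; simp [pvParseBin, List.foldl] at hparse; omega)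
  · intro h
    rw [pvGoodOnes_eval]
    rcases h with h | h | h | h | h | h | h | h <;> subst h <;> simp [pvBinCore, pvPad8]

theorem pvLoopA_eq_target (v : Int) (hv : 1 ≤ v) : pvLoopA v = pvTarget v := by
  induction hk : v.toNat using Nat.strong_induction_on generalizing v with
  | _ k ih =>
    rw [pvLoopA]
    by_cases hmem : pvPad8 (pvBinCore v.toNat) ∈ pvGoodOnes
    · simp only [dif_neg (show ¬ v ≤ 0 by omega), if_pos hmem]
      have hS := (pvMem_goodOnes v.toNat (by omega)).mp hmem
      rw [pvParseBin_pad8, pvParseBin_binCore]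
      rcases hS with h | h | h | h | h | h | h | h <;>
        (unfold pvTarget; split_ifs <;> omega)
    · simp only [dif_neg (show ¬ v ≤ 0 by omega), if_neg hmem]
      have hS := (not_iff_not.mpr (pvMem_goodOnes v.toNat (by omega))).mp hmem
      simp only [not_or] at hS
      obtain ⟨n1, n3, n7, n15, n31, n63, n127, n255⟩ := hS
      have hv2 : 2 ≤ v := by by_contra h; exact n1 (by omega)
      have htgt : pvTarget (v - 1) = pvTarget v := by
        unfold pvTarget; split_ifs <;> omega
      rw [← htgt]
      exact ih (v - 1).toNat (by omega) (v - 1) (by omega) rfl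

theorem pvAltLoop_eq_target (v : Int) (hv : 1 ≤ v) : pvAltLoop v 255 = pvTarget v := by
  have step : ∀ m : Int, 0 < m → v < m → pvAltLoop v m = pvAltLoop v (PySem.Int.floordiv m 2) := by
    intro m h1 h2; rw [pvAltLoop, dif_neg (by omega), if_pos (by omega)]
  have stop : ∀ m : Int, 0 < m → m ≤ v → pvAltLoop v m = m := by
    intro m h1 h2; rw [pvAltLoop, dif_neg (by omega), if_neg (by omega)]
  have e1 : PySem.Int.floordiv 255 2 = 127 := by decide
  have e2 : PySem.Int.floordiv 127 2 = 63 := by decide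
  have e3 : PySem.Int.floordiv 63 2 = 31 := by decide
  have e4 : PySem.Int.floordiv 31 2 = 15 := by decide
  have e5 : PySem.Int.floordiv 15 2 = 7 := by decide
  have e6 : PySem.Int.floordiv 7 2 = 3 := by decide
  have e7 : PySem.Int.floordiv 3 2 = 1 := by decide
  unfold pvTarget
  split_ifs with h1 h2 h3 h4 h5 h6 h7
  · rw [stop 255 (by norm_num) (by omega)]
  · rw [step 255 (by norm_num) (by omega), e1, stop 127 (by norm_num) (by omega)]
  · rw [step 255 (by norm_num) (by omega), e1, step 127 (by norm_num) (by omega), e2,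
        stop 63 (by norm_num) (by omega)]
  · rw [step 255 (by norm_num) (by omega), e1, step 127 (by norm_num) (by omega), e2,
        step 63 (by norm_num) (by omega), e3, stop 31 (by norm_num) (by omega)]
  · rw [step 255 (by norm_num) (by omega), e1, step 127 (by norm_num) (by omega), e2,
        step 63 (by norm_num) (by omega), e3, step 31 (by norm_num) (by omega), e4,
        stop 15 (by norm_num) (by omega)]
  · rw [step 255 (by norm_num) (by omega), e1, step 127 (by norm_num) (by omega), e2,
        step 63 (by norm_num) (by omega), e3, step 31 (by norm_num) (by omega), e4,
        step 15 (by norm_num) (by omega), e5, stop 7 (by norm_num) (by omega)]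
  · rw [step 255 (by norm_num) (by omega), e1, step 127 (by norm_num) (by omega), e2,
        step 63 (by norm_num) (by omega), e3, step 31 (by norm_num) (by omega), e4,
        step 15 (by norm_num) (by omega), e5, step 7 (by norm_num) (by omega), e6,
        stop 3 (by norm_num) (by omega)]
  · rw [step 255 (by norm_num) (by omega), e1, step 127 (by norm_num) (by omega), e2,
        step 63 (by norm_num) (by omega), e3, step 31 (by norm_num) (by omega), e4,
        step 15 (by norm_num) (by omega), e5, step 7 (by norm_num) (by omega), e6,
        step 3 (by norm_num) (by omega), e7, stop 1 (by norm_num) (by omega)]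

-- ===== VERDICT (by name: the statement is the Claim_ definition above) =====
theorem getClosestPowerOf2Minus1_spec : Claim_equal_getClosestPowerOf2Minus1 := by
  intro v _ hpre
  unfold Spec_getClosestPowerOf2Minus1 getClosestPowerOf2Minus1 getClosestPowerOf2Minus1_alt
  rw [pvLoopA_eq_target v hpre, pvAltLoop_eq_target v hpre]
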